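-- pv_equiv track=rewrite | github.com/xxxeus/Turing-Knowledge-Graph | code/01_ner_disambiguation.py | decode_entities
-- ===== SOURCE A (Python) =====
-- def decode_entities(chars, labels):
--     entities = []
--     current_chars = []
--     current_type = None
--     for char, label in zip(chars, labels):
--         if label == "O":
--             if current_chars:
--                 entities.append(("".join(current_chars), current_type))
--                 current_chars, current_type = [], None
--             continue
--
--         prefix, entity_type = label.split("-", 1)
--         if prefix == "B" or entity_type != current_type:
--             if current_chars:
--                 entities.append(("".join(current_chars), current_type))
--             current_chars = [char]
--             current_type = entity_type
--         else:
--             current_chars.append(char)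
--
--     if current_chars:
--         entities.append(("".join(current_chars), current_type))
--     return entities
-- ===== SOURCE B (Python) =====
-- def decode_entities(chars, labels):
--     # pass 1: tag each position with a (segment_id, type) pair, or None for "O"
--     tags = []
--     sid = -1
--     run = None
--     for label in labels[:len(chars)]:
--         if label == "O":
--             tags.append(None)
--             run = None
--         else:
--             prefix, etype = label.split("-", 1)
--             if prefix == "B" or etype != run:
--                 sid += 1
--                 run = etype
--             tags.append((sid, etype))
--     # pass 2: group consecutive positions carrying the same tag
--     out = []
--     i = 0
--     n = len(tags)
--     while i < n:
--         tag = tags[i]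
--         if tag is None:
--             i += 1
--             continue
--         j = i + 1
--         while j < n and tags[j] == tag:
--             j += 1
--         out.append(("".join(chars[i:j]), tag[1]))
--         i = j
--     return out
-- ===== Notes on version B (the rewrite author's own statement) =====
-- stated objective: alternative
-- what changed: Replaces the single stateful accumulate-and-flush loop with a two-phase decomposition: a first pass tags every position with a (segment-id, type) pair (None for 'O'), then a second pass groups consecutive equal tags and joins each group's chars.
import Mathlib
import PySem

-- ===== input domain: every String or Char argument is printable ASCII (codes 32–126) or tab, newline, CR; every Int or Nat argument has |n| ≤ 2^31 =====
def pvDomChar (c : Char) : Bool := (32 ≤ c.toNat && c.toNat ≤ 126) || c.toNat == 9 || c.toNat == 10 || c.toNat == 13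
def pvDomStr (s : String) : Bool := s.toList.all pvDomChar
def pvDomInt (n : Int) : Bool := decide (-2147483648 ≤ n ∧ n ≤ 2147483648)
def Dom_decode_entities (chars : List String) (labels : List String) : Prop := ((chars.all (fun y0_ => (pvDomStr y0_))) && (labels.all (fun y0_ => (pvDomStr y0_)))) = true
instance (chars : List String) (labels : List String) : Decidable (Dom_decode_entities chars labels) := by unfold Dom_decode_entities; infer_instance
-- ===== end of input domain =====

-- B decodes BIO labels by a two-phase decomposition (tag every position with a segment id+type,
-- then group consecutive equal tags) instead of A's single accumulate-and-flush loop; same cost.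
-- Pre_ excludes inputs where Python raises ValueError (a zipped non-"O" label with no "-").

-- ===== PORT A =====
-- shared primitive: label.split("-", 1) unpacked into two parts; none exactly where Python's
-- two-variable unpacking raises ValueError (no "-" in the label)
def splitDash : List Char → Option (List Char × List Char)
  | [] => none
  | c :: rest =>
    if c = '-' then some ([], rest)
    else
      match splitDash rest with
      | none => none
      | some (a, b) => some (c :: a, b)

def pySplitDash1 (s : String) : Option (String × String) :=
  (splitDash s.toList).map (fun p => (String.ofList p.1, String.ofList p.2))

-- A's for-loop over zip(chars, labels) with state (current_chars, current_type), emitting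
-- entities in order
def loopA : List (String × String) → List String → Option String → List (String × String)
  | [], cur, cty => if cur ≠ [] then [(String.join cur, cty.getD "")] else []
  | (ch, lab) :: rest, cur, cty =>
    if lab = "O" then
      if cur ≠ [] then (String.join cur, cty.getD "") :: loopA rest [] none
      else loopA rest cur cty
    else
      match pySplitDash1 lab with
      | none => loopA rest cur cty   -- Python raises ValueError here; excluded by Pre_
      | some (pre, ty) =>
        if pre = "B" ∨ some ty ≠ cty then
          (if cur ≠ [] then [(String.join cur, cty.getD "")] else []) ++ loopA rest [ch] (some ty)
        else loopA rest (cur ++ [ch]) cty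

def decode_entities (chars : List String) (labels : List String) : List (String × String) :=
  loopA (chars.zip labels) [] none

-- ===== PORT B =====
-- pass 1: tag each label position with (segment_id, type), or none for "O"
def pass1 : List String → Int → Option String → List (Option (Int × String))
  | [], _, _ => []
  | lab :: rest, sid, run =>
    if lab = "O" then none :: pass1 rest sid none
    else
      match pySplitDash1 lab with
      | none => none :: pass1 rest sid run   -- Python raises ValueError here; excluded by Pre_
      | some (pre, ty) =>
        if pre = "B" ∨ some ty ≠ run then some (sid + 1, ty) :: pass1 rest (sid + 1) (some ty)
        else some (sid, ty) :: pass1 rest sid (some ty)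

-- pass 2: group consecutive positions carrying the same tag
def group2 : List (String × Option (Int × String)) → List (String × String)
  | [] => []
  | (_, none) :: rest => group2 rest
  | (c, some (sid, ty)) :: rest =>
    (String.join (c :: (rest.takeWhile (fun p => decide (p.2 = some (sid, ty)))).map Prod.fst), ty)
      :: group2 (rest.dropWhile (fun p => decide (p.2 = some (sid, ty))))
termination_by zs => zs.length
decreasing_by
  all_goals first
    | exact Nat.lt_succ_of_le (List.length_dropWhile_le _ _)
    | simp

def decode_entities_alt (chars : List String) (labels : List String) : List (String × String) :=
  group2 (chars.zip (pass1 (labels.take chars.length) (-1) none))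

-- ===== PRECONDITION & SPEC =====
-- Pre_ excludes exactly the inputs on which Python A raises ValueError: a zipped label other
-- than "O" that contains no '-' makes `label.split("-", 1)` unpack fail.
def Pre_decode_entities (chars : List String) (labels : List String) : Prop :=
  ∀ p ∈ chars.zip labels, p.2 ≠ "O" → '-' ∈ p.2.toList
instance (chars : List String) (labels : List String) : Decidable (Pre_decode_entities chars labels) := by unfold Pre_decode_entities; infer_instance

def pvWitness_decode_entities : List String × List String :=
  (["T", "u", "r", "i", "n", "g"], ["B-PER", "I-PER", "O", "B-LOC", "I-LOC", "I-ORG"])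

def Spec_decode_entities (chars : List String) (labels : List String) (out : List (String × String)) : Prop := out = decode_entities_alt chars labels
instance (chars : List String) (labels : List String) (out : List (String × String)) : Decidable (Spec_decode_entities chars labels out) := by unfold Spec_decode_entities; infer_instance

-- ===== CLAIM (what is proved, stated in full; the proofs are below) =====
def Claim_equal_decode_entities : Prop := ∀ (chars : List String) (labels : List String), Dom_decode_entities chars labels → Pre_decode_entities chars labels → Spec_decode_entities chars labels (decode_entities chars labels)

-- ===== LEMMAS AND PROOFS =====

lemma splitDash_isSome (cs : List Char) (h : '-' ∈ cs) : (splitDash cs).isSome = true := by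
  induction cs with
  | nil => simp at h
  | cons c rest ih =>
    by_cases hc : c = '-'
    · simp [splitDash, hc]
    · have hm : '-' ∈ rest := by
        rcases List.mem_cons.mp h with h' | h'
        · exact absurd h'.symm hc
        · exact h'
      have := ih hm
      simp [splitDash, hc]
      rcases hs : splitDash rest with _ | ⟨a, b⟩
      · rw [hs] at this; simp at this
      · simp

lemma zip_take_right {α β : Type} : ∀ (l1 : List α) (l2 : List β),
    l1.zip (l2.take l1.length) = l1.zip l2
  | [], _ => rfl
  | _ :: _, [] => rfl
  | a :: t1, b :: t2 => by
    simp only [List.length_cons, List.take_succ_cons, List.zip_cons_cons]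
    rw [zip_take_right t1 t2]

lemma group2_nil : group2 [] = [] := by simp only [group2]

lemma group2_cons_none (c : String) (rest : List (String × Option (Int × String))) :
    group2 ((c, none) :: rest) = group2 rest := by simp only [group2]

lemma group2_cons_some (c : String) (sid : Int) (ty : String)
    (rest : List (String × Option (Int × String))) :
    group2 ((c, some (sid, ty)) :: rest) =
      (String.join (c :: (rest.takeWhile (fun p => decide (p.2 = some (sid, ty)))).map Prod.fst), ty)
        :: group2 (rest.dropWhile (fun p => decide (p.2 = some (sid, ty)))) := by simp only [group2]

lemma main_lemma : ∀ (chars labels : List String) (sid : Int),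
    (∀ p ∈ chars.zip labels, p.2 ≠ "O" → (pySplitDash1 p.2).isSome = true) →
    (loopA (chars.zip labels) [] none = group2 (chars.zip (pass1 labels sid none)))
    ∧ (∀ (ty : String) (cur : List String), cur ≠ [] →
        loopA (chars.zip labels) cur (some ty) =
          (String.join (cur ++ ((chars.zip (pass1 labels sid (some ty))).takeWhile
              (fun p => decide (p.2 = some (sid, ty)))).map Prod.fst), ty)
            :: group2 ((chars.zip (pass1 labels sid (some ty))).dropWhile
              (fun p => decide (p.2 = some (sid, ty))))) := by
  intro chars
  induction chars with
  | nil =>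
    intro labels sid _
    constructor
    · simp [loopA, group2_nil]
    · intro ty cur hcur
      simp [loopA, group2_nil, hcur]
  | cons ch chars ih =>
    intro labels sid h
    cases labels with
    | nil =>
      constructor
      · simp [loopA, pass1, group2_nil]
      · intro ty cur hcur
        simp [loopA, pass1, group2_nil, hcur]
    | cons lab labels =>
      have hhead := h (ch, lab) (by simp)
      have htail : ∀ p ∈ chars.zip labels, p.2 ≠ "O" → (pySplitDash1 p.2).isSome = true := by
        intro p hp; exact h p (by simp [hp])
      by_cases hO : lab = "O"
      · constructor
        · simp only [List.zip_cons_cons]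
          simp [loopA, pass1, hO, group2_cons_none]
          exact (ih labels sid htail).1
        · intro ty cur hcur
          simp only [List.zip_cons_cons]
          simp [loopA, pass1, hO, hcur, group2_cons_none]
          exact (ih labels sid htail).1
      · rcases hs : pySplitDash1 lab with _ | ⟨pre, ty'⟩
        · exfalso; have := hhead hO; rw [hs] at this; simp at this
        · constructor
          · -- cty = none, cur = [] : the condition `pre = "B" ∨ some ty' ≠ none` always holds
            simp only [List.zip_cons_cons]
            simp [loopA, pass1, hO, hs, group2_cons_some]
            rw [(ih labels (sid + 1) htail).2 ty' [ch] (by simp)]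
            simp
          · intro ty cur hcur
            simp only [List.zip_cons_cons]
            by_cases hcond : pre = "B" ∨ some ty' ≠ (some ty : Option String)
            · have hne : ¬ ((some (sid + 1, ty') : Option (Int × String)) = some (sid, ty)) := by
                intro hcontra
                have h1 : sid + 1 = sid := by
                  have := Option.some.inj hcontra
                  exact congrArg Prod.fst this
                omega
              simp [loopA, pass1, hO, hs, hcur]
              rw [(ih labels (sid + 1) htail).2 ty' [ch] (by simp)]
              have hc2 : pre = "B" ∨ ¬ty' = ty := by simpa using hcond
              simp only [if_pos hc2]
              simp [List.zip_cons_cons, hne, group2_cons_some]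
            · have hty : ty' = ty := by
                rcases (not_or.mp hcond) with ⟨_, h2⟩
                simpa using not_not.mp (by simpa using h2)
              subst hty
              simp [loopA, pass1, hO, hs]
              rw [(ih labels sid htail).2 ty' (cur ++ [ch]) (by simp)]
              have hB : ¬pre = "B" := fun hb => hcond (Or.inl hb)
              simp only [if_neg hB]
              simp [List.zip_cons_cons]

-- ===== VERDICT (by name: the statement is the Claim_ definition above) =====
theorem decode_entities_spec : Claim_equal_decode_entities := by
  intro chars labels _ hpre
  unfold Spec_decode_entities decode_entities decode_entities_alt
  rw [← zip_take_right chars labels]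
  have h : ∀ p ∈ chars.zip (labels.take chars.length), p.2 ≠ "O" → (pySplitDash1 p.2).isSome = true := by
    intro p hp hO
    have hp' : p ∈ chars.zip labels := by rw [← zip_take_right chars labels]; exact hp
    have := hpre p hp' hO
    simpa [pySplitDash1, Option.isSome_map] using splitDash_isSome _ this
  exact (main_lemma chars (labels.take chars.length) (-1) h).1
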